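-- pv_equiv track=rewrite | github.com/liao6594062/td_bair_union_model | c_tools.py | v2_AssignGroup
-- ===== SOURCE A (Python) =====
-- def v2_AssignGroup(x, bin,special_attribute=[]):
--     numBin = len(bin) + 1 + len(special_attribute)
--     if x  in special_attribute:
--         i = special_attribute.index(x) +1
--         return "NA"
--     elif  x <= bin[0]:
--         return  "(-00,{}]".format(bin[0])
--     elif   x > bin[-1]:
--         return "({},+00])".format(bin[-1])
--     else:
--         for i in range(0, numBin - 1):
--             if bin[i] < x <= bin[i + 1]:
--                 return "({},{}]".format(bin[i], bin[i + 1])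
-- ===== SOURCE B (Python) =====
-- from bisect import bisect_left
--
-- def v2_AssignGroup(x, bin, special_attribute=[]):
--     if x in special_attribute:
--         return "NA"
--     if x <= bin[0]:
--         return "(-00,{}]".format(bin[0])
--     if x > bin[-1]:
--         return "({},+00])".format(bin[-1])
--     i = bisect_left(bin, x)
--     return "({},{}]".format(bin[i - 1], bin[i])
-- ===== Notes on version B (the rewrite author's own statement) =====
-- stated objective: alternative
-- what changed: Keeps the special-value and two edge checks but replaces A's linear first-match scan over consecutive bin pairs by a bisect_left binary search on the bin boundaries.
-- outside the precondition, e.g. on v2_AssignGroup(2, [1, 3, 0, 5], []): A returns '(1,3]', B returns '(0,5]'; on v2_AssignGroup(3, [], []): A raises IndexError, B raises IndexError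
import Mathlib
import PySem

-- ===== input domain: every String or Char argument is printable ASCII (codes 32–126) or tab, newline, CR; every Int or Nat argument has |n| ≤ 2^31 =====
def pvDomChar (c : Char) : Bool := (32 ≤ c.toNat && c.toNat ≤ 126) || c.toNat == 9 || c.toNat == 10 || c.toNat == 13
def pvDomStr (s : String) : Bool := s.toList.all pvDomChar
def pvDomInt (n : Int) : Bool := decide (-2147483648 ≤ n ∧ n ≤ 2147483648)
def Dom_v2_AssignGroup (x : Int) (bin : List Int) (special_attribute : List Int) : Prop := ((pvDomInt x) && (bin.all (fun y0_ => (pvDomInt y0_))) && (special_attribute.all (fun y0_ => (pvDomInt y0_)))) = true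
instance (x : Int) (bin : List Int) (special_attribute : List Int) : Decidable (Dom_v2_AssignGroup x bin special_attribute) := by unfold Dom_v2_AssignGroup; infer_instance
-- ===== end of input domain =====

-- B keeps A's special-value and edge checks but replaces the linear first-match scan
-- over consecutive bin pairs by a bisect_left binary search (objective: alternative).


-- ===== PORT A =====
-- A's for-loop 'for i in range(0, numBin - 1): if bin[i] < x <= bin[i + 1]: return …';
-- Python's chained comparison short-circuits, so bin[i+1] is only read when bin[i] < x;
-- an out-of-range access (IndexError, excluded by Pre_) is rendered as none.
def pvALoop (x : Int) (bin : List Int) : Nat → Nat → Option String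
  | 0, _ => none
  | f + 1, i =>
    match PySem.List.pyGet? bin (i : Int) with
    | none => none
    | some lo =>
      if lo < x then
        match PySem.List.pyGet? bin ((i : Int) + 1) with
        | none => none
        | some hi =>
          if x ≤ hi then some ("(" ++ PySem.Int.toStr lo ++ "," ++ PySem.Int.toStr hi ++ "]")
          else pvALoop x bin f (i + 1)
      else pvALoop x bin f (i + 1)

def v2_AssignGroup (x : Int) (bin : List Int) (special_attribute : List Int) : Option String :=
  let numBin := bin.length + 1 + special_attribute.length
  if special_attribute.contains x then some "NA"   -- (A also computes an unused index i here)
  else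
    match PySem.List.pyGet? bin 0 with
    | none => none                                  -- IndexError on empty bin (outside Pre_)
    | some b0 =>
      if x ≤ b0 then some ("(-00," ++ PySem.Int.toStr b0 ++ "]")
      else
        match PySem.List.pyGet? bin (-1) with
        | none => none
        | some bl =>
          if bl < x then some ("(" ++ PySem.Int.toStr bl ++ ",+00])")
          else pvALoop x bin (numBin - 1) 0

-- ===== PORT B =====
-- bisect.bisect_left, transliterated as the standard lo/hi halving loop it performs;
-- a[mid] is rendered with getD (mid is always in range while lo < hi ≤ len).
def pvBisectLeft (a : List Int) (x : Int) : Nat → Nat → Nat → Nat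
  | 0, lo, _ => lo
  | f + 1, lo, hi =>
    if lo < hi then
      let mid := (lo + hi) / 2
      if a.getD mid 0 < x then pvBisectLeft a x f (mid + 1) hi
      else pvBisectLeft a x f lo mid
    else lo

def v2_AssignGroup_alt (x : Int) (bin : List Int) (special_attribute : List Int) : Option String :=
  if special_attribute.contains x then some "NA"
  else
    match PySem.List.pyGet? bin 0 with
    | none => none                                  -- IndexError on empty bin (outside Pre_)
    | some b0 =>
      if x ≤ b0 then some ("(-00," ++ PySem.Int.toStr b0 ++ "]")
      else
        match PySem.List.pyGet? bin (-1) with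
        | none => none
        | some bl =>
          if bl < x then some ("(" ++ PySem.Int.toStr bl ++ ",+00])")
          else
            let i := pvBisectLeft bin x bin.length 0 bin.length
            -- bin[i-1], bin[i]: rendered with getD; in range whenever bin[0] < x ≤ bin[-1]
            some ("(" ++ PySem.Int.toStr (bin.getD (i - 1) 0) ++ "," ++ PySem.Int.toStr (bin.getD i 0) ++ "]")

-- ===== PRECONDITION & SPEC =====
-- Pre_ excludes the empty bin list (A raises IndexError there) and unsorted bin lists
-- with x strictly inside (bin[0], bin[-1]]: bin holds sorted interval boundaries, and on
-- unsorted bins A's first-match scan there may raise IndexError or return an accidental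
-- first-matching interval — a corner no caller would specify.
def Pre_v2_AssignGroup (x : Int) (bin : List Int) (special_attribute : List Int) : Prop :=
  bin ≠ [] ∧ (x ∈ special_attribute ∨ x ≤ bin.getD 0 0 ∨ bin.getD (bin.length - 1) 0 < x ∨
    List.Pairwise (· ≤ ·) bin)
instance (x : Int) (bin : List Int) (special_attribute : List Int) : Decidable (Pre_v2_AssignGroup x bin special_attribute) := by unfold Pre_v2_AssignGroup; infer_instance

def pvWitness_v2_AssignGroup : Int × List Int × List Int := (3, [0, 5, 10], [7])

def Spec_v2_AssignGroup (x : Int) (bin : List Int) (special_attribute : List Int) (out : Option String) : Prop := out = v2_AssignGroup_alt x bin special_attribute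
instance (x : Int) (bin : List Int) (special_attribute : List Int) (out : Option String) : Decidable (Spec_v2_AssignGroup x bin special_attribute out) := by unfold Spec_v2_AssignGroup; infer_instance

-- ===== CLAIM (what is proved, stated in full; the proofs are below) =====
def Claim_equal_v2_AssignGroup : Prop := ∀ (x : Int) (bin : List Int) (special_attribute : List Int), Dom_v2_AssignGroup x bin special_attribute → Pre_v2_AssignGroup x bin special_attribute → Spec_v2_AssignGroup x bin special_attribute (v2_AssignGroup x bin special_attribute)

-- ===== LEMMAS AND PROOFS =====

-- the boundary index: first position whose element is ≥ x
def pvIdx (x : Int) (bin : List Int) : Nat := List.findIdx (fun b => decide (x ≤ b)) bin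

theorem pvIdx_le_length (x : Int) (bin : List Int) : pvIdx x bin ≤ bin.length :=
  List.findIdx_le_length

theorem lt_of_lt_pvIdx {x : Int} {bin : List Int} {j : Nat} (hj : j < pvIdx x bin)
    (hl : j < bin.length) : bin[j] < x := by
  have := List.not_of_lt_findIdx (p := fun b => decide (x ≤ b)) hj
  simp at this; omega

theorem pvIdx_le_of_le {x : Int} {bin : List Int} {j : Nat} (hl : j < bin.length)
    (h : x ≤ bin[j]) : pvIdx x bin ≤ j := by
  by_contra hlt
  push_neg at hlt
  have := List.not_of_lt_findIdx (p := fun b => decide (x ≤ b)) hlt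
  simp at this; omega

theorem le_of_pvIdx_le {x : Int} {bin : List Int}
    (hs : List.Pairwise (· ≤ ·) bin) {j : Nat} (hij : pvIdx x bin ≤ j)
    (hl : j < bin.length) : x ≤ bin[j] := by
  by_contra hx
  push_neg at hx
  have hlt : pvIdx x bin < bin.length := Nat.lt_of_le_of_lt hij hl
  have htrue : decide (x ≤ bin[pvIdx x bin]'hlt) = true :=
    List.findIdx_getElem (p := fun b => decide (x ≤ b)) (w := hlt)
  simp only [decide_eq_true_eq] at htrue
  rcases Nat.lt_or_ge (pvIdx x bin) j with hj | hj
  · have := List.pairwise_iff_getElem.mp hs _ _ hlt hl hj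
    omega
  · have heq : bin[pvIdx x bin]'hlt = bin[j] := by congr 1; omega
    rw [heq] at htrue; omega

-- bisect_left computes the boundary index on a sorted list
theorem pvBisectLeft_eq {x : Int} {bin : List Int} (hs : List.Pairwise (· ≤ ·) bin) :
    ∀ (f lo hi : Nat), lo ≤ pvIdx x bin → pvIdx x bin ≤ hi → hi ≤ bin.length →
      hi - lo ≤ f → pvBisectLeft bin x f lo hi = pvIdx x bin := by
  intro f
  induction f with
  | zero => intro lo hi h1 h2 h3 h4; simp [pvBisectLeft]; omega
  | succ f ih =>
    intro lo hi h1 h2 h3 h4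
    simp only [pvBisectLeft]
    split
    · next hlh =>
      have hmid : (lo + hi) / 2 < bin.length := by omega
      have hget : bin.getD ((lo + hi) / 2) 0 = bin[(lo + hi) / 2] := List.getD_eq_getElem _ _ hmid
      rw [hget]
      split
      · next hlt =>
        have : (lo + hi) / 2 + 1 ≤ pvIdx x bin := by
          by_contra hc
          push_neg at hc
          have := le_of_pvIdx_le (x := x) hs (j := (lo + hi) / 2) (by omega) hmid
          omega
        exact ih _ _ this h2 h3 (by omega)
      · next hge =>
        have : pvIdx x bin ≤ (lo + hi) / 2 := pvIdx_le_of_le hmid (by omega)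
        exact ih _ _ h1 this (by omega) (by omega)
    · next hlh => omega

-- A's scan, started below the boundary, stops exactly at the boundary
theorem pvALoop_eq {x : Int} {bin : List Int} (hs : List.Pairwise (· ≤ ·) bin)
    (h1 : 1 ≤ pvIdx x bin) (h2 : pvIdx x bin < bin.length) :
    ∀ (f p : Nat), p + 1 ≤ pvIdx x bin → pvIdx x bin - p ≤ f →
      pvALoop x bin f p =
        some ("(" ++ PySem.Int.toStr (bin[pvIdx x bin - 1]'(by omega)) ++ "," ++
              PySem.Int.toStr (bin[pvIdx x bin]'h2) ++ "]") := by
  intro f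
  induction f with
  | zero => intro p hp hf; omega
  | succ f ih =>
    intro p hp hf
    have hpl : p < bin.length := by omega
    have hp1 : p + 1 ≤ bin.length := by omega
    have hcast : ((p : Int) + 1) = ((p + 1 : Nat) : Int) := by push_cast; ring
    simp only [pvALoop, hcast, PySem.List.pyGet?_natCast, List.getElem?_eq_getElem hpl]
    have hlo : bin[p] < x := lt_of_lt_pvIdx (by omega) hpl
    split
    · -- bin[p] < x holds here (p is below the boundary)
      rcases Nat.lt_or_ge (p + 1) (pvIdx x bin) with hplt | hpge
      · -- not yet at the boundary: bin[p+1] < x, recurse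
        have hp1' : p + 1 < bin.length := by omega
        simp only [List.getElem?_eq_getElem hp1']
        have hlt : bin[p + 1] < x := lt_of_lt_pvIdx hplt hp1'
        split
        · next hx1 => exact absurd hx1 (by omega)
        · next _ => exact ih (p + 1) (by omega) (by omega)
      · -- p + 1 is the boundary: x ≤ bin[p+1], return
        have heq : p + 1 = pvIdx x bin := by omega
        have hp1' : p + 1 < bin.length := by omega
        simp only [List.getElem?_eq_getElem hp1']
        split
        · next _ => simp only [← heq, Nat.add_sub_cancel]
        · next hx1 => exact absurd (le_of_pvIdx_le (x := x) hs (by omega) hp1') hx1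
    · next h => exact absurd hlo h

theorem v2_AssignGroup_spec_aux (x : Int) (bin : List Int) (special_attribute : List Int)
    (hpre : Pre_v2_AssignGroup x bin special_attribute) :
    v2_AssignGroup x bin special_attribute = v2_AssignGroup_alt x bin special_attribute := by
  obtain ⟨hne, hcase⟩ := hpre
  have hlen : 0 < bin.length := List.length_pos_iff.mpr hne
  unfold v2_AssignGroup v2_AssignGroup_alt
  by_cases hsp : special_attribute.contains x
  · rw [if_pos hsp, if_pos hsp]
  · rw [if_neg hsp, if_neg hsp]
    have hb0 : PySem.List.pyGet? bin 0 = some (bin[0]'hlen) := by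
      rw [PySem.List.pyGet?_zero, List.getElem?_eq_getElem hlen]
    have hbl : PySem.List.pyGet? bin (-1) = some (bin[bin.length - 1]'(by omega)) := by
      rw [PySem.List.pyGet?_neg_one, List.getLast?_eq_getElem?, List.getElem?_eq_getElem (by omega)]
    simp only [hb0, hbl]
    by_cases hx0 : x ≤ bin[0]'hlen
    · rw [if_pos hx0, if_pos hx0]
    · push_neg at hx0
      have hnx0 : ¬ x ≤ bin[0]'hlen := by omega
      rw [if_neg hnx0, if_neg hnx0]
      by_cases hxl : bin[bin.length - 1]'(by omega) < x
      · rw [if_pos hxl, if_pos hxl]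
      · push_neg at hxl
        have hnxl : ¬ bin[bin.length - 1]'(by omega) < x := by omega
        rw [if_neg hnxl, if_neg hnxl]
        -- interior case: Pre_ leaves only the sorted alternative
        have hs : List.Pairwise (· ≤ ·) bin := by
          rcases hcase with h | h | h | h
          · exact absurd (by simpa using h) hsp
          · rw [List.getD_eq_getElem _ _ hlen] at h; omega
          · rw [List.getD_eq_getElem _ _ (show bin.length - 1 < bin.length by omega)] at h
            omega
          · exact h
        have hi1 : 1 ≤ pvIdx x bin := by
          by_contra hc
          push_neg at hc
          have := le_of_pvIdx_le (x := x) hs (j := 0) (by omega) hlen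
          omega
        have hilt : pvIdx x bin < bin.length := by
          have := pvIdx_le_of_le (show bin.length - 1 < bin.length by omega) hxl
          omega
        have hbis := pvBisectLeft_eq (x := x) hs bin.length 0 bin.length
          (Nat.zero_le _) (pvIdx_le_length x bin) le_rfl (by omega)
        rw [hbis, pvALoop_eq hs hi1 hilt _ 0 (by omega) (by omega),
            List.getD_eq_getElem _ _ (show pvIdx x bin - 1 < bin.length by omega),
            List.getD_eq_getElem _ _ hilt]

-- ===== VERDICT (by name: the statement is the Claim_ definition above) =====
theorem v2_AssignGroup_spec : Claim_equal_v2_AssignGroup := by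
  intro x bin special_attribute _hdom hpre
  exact v2_AssignGroup_spec_aux x bin special_attribute hpre
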